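-- pv_equiv track=rewrite | github.com/khaimt/qa_expert | tests/test_prompt.py | extract_unmasked_chunks
-- ===== SOURCE A (Python) =====
-- from typing import List
--
-- def extract_unmasked_chunks(labels: List[int]) -> List[List[int]]:
--     """This function is used to extract unmasked chunks of integer
--     For example, labels = [-100, -100, 1, 2, 3, -100, -100, 4, 5] --> chunks = [[1,2,3], [4,5]]
--     Args:
--         labels (List[int]): list of integer containing token_id and -100
--
--     Returns:
--         List[List[int]]: list of chunk, for example: [[1,2,3], [4,5]]
--     """
--     chunks = []
--     chunk = []
--     for token_id in labels:
--         if token_id != -100: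
--             chunk.append(token_id)
--         else:
--             if len(chunk) > 0:
--                 chunks.append(chunk)
--                 chunk = []
--     if len(chunk) > 0:
--         chunks.append(chunk)
--     return chunks
-- ===== SOURCE B (Python) =====
-- from typing import List
-- from itertools import groupby
--
-- def extract_unmasked_chunks(labels: List[int]) -> List[List[int]]:
--     return [list(g) for masked, g in groupby(labels, key=lambda t: t == -100) if not masked]
-- ===== Notes on version B (the rewrite author's own statement) =====
-- stated objective: idiomatic
-- what changed: Replaces the explicit chunk accumulator with end-of-loop flush by itertools.groupby run grouping followed by filtering out the masked (-100) groups.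
import Mathlib
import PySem

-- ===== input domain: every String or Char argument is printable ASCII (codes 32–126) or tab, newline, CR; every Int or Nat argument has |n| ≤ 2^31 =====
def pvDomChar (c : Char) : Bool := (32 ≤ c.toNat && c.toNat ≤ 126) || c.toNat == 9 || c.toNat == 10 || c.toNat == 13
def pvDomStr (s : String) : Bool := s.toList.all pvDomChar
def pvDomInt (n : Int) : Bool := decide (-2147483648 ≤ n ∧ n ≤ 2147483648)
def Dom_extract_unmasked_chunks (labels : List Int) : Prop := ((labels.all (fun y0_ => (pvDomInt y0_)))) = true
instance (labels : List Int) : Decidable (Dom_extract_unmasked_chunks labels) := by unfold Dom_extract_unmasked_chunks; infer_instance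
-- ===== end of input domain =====

-- B replaces A's explicit chunk accumulator and end-of-loop flush by groupby-style
-- run grouping followed by filtering out the masked (-100) runs (idiomatic; same cost).


-- ===== PORT A =====
-- A: one pass with accumulator pair (chunks, chunk); flush pending chunk on -100 and at the end.
def extract_unmasked_chunks (labels : List Int) : List (List Int) :=
  let s := labels.foldl
    (fun (s : List (List Int) × List Int) token_id =>
      if token_id ≠ -100 then (s.1, s.2 ++ [token_id])
      else if s.2.length > 0 then (s.1 ++ [s.2], ([] : List Int)) else s)
    ([], [])
  if s.2.length > 0 then s.1 ++ [s.2] else s.1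

-- ===== PORT B =====
-- groupby(labels, key = t == -100): maximal runs of equal key, in order.
def pvRuns (l : List Int) : List (List Int) :=
  match l with
  | [] => []
  | x :: xs =>
    (x :: xs.takeWhile (fun y => decide (y = -100) == decide (x = -100)))
      :: pvRuns (xs.dropWhile (fun y => decide (y = -100) == decide (x = -100)))
termination_by l.length
decreasing_by
  simpa using Nat.lt_succ_of_le (List.length_dropWhile_le _ _)

def extract_unmasked_chunks_alt (labels : List Int) : List (List Int) :=
  (pvRuns labels).filter (fun g => !(g.head? == some (-100)))

-- ===== PRECONDITION & SPEC =====
def Spec_extract_unmasked_chunks (labels : List Int) (out : List (List Int)) : Prop := out = extract_unmasked_chunks_alt labels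
instance (labels : List Int) (out : List (List Int)) : Decidable (Spec_extract_unmasked_chunks labels out) := by unfold Spec_extract_unmasked_chunks; infer_instance

-- ===== CLAIM (what is proved, stated in full; the proofs are below) =====
def Claim_equal_extract_unmasked_chunks : Prop := ∀ (labels : List Int), Dom_extract_unmasked_chunks labels → Spec_extract_unmasked_chunks labels (extract_unmasked_chunks labels)

-- ===== LEMMAS AND PROOFS =====

-- Recursive characterisation of A's loop with pending chunk `c`.
def pvG (c : List Int) (l : List Int) : List (List Int) :=
  match l with
  | [] => if c.length > 0 then [c] else []
  | t :: ts =>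
    if t ≠ -100 then pvG (c ++ [t]) ts
    else if c.length > 0 then c :: pvG [] ts else pvG [] ts

def pvStep (s : List (List Int) × List Int) (token_id : Int) : List (List Int) × List Int :=
  if token_id ≠ -100 then (s.1, s.2 ++ [token_id])
  else if s.2.length > 0 then (s.1 ++ [s.2], ([] : List Int)) else s

theorem pvG_eq_fold (l : List Int) : ∀ (chunks : List (List Int)) (c : List Int),
    (if (List.foldl pvStep (chunks, c) l).2.length > 0
      then (List.foldl pvStep (chunks, c) l).1 ++ [(List.foldl pvStep (chunks, c) l).2]
      else (List.foldl pvStep (chunks, c) l).1) = chunks ++ pvG c l := by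
  induction l with
  | nil =>
    intro chunks c
    simp only [List.foldl_nil, pvG]
    split <;> simp
  | cons t ts ih =>
    intro chunks c
    simp only [List.foldl_cons, pvG, pvStep]
    by_cases ht : t = -100
    · subst ht
      by_cases hc : c.length > 0
      · simp [hc, ih]
      · have hc0 : c = [] := List.eq_nil_of_length_eq_zero (by omega)
        simp [hc0, ih]
    · simp [ht, ih]

theorem extract_eq_pvG (l : List Int) : extract_unmasked_chunks l = pvG [] l := by
  have h : extract_unmasked_chunks l =
      (if (List.foldl pvStep ([], []) l).2.length > 0
        then (List.foldl pvStep ([], []) l).1 ++ [(List.foldl pvStep ([], []) l).2]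
        else (List.foldl pvStep ([], []) l).1) := rfl
  rw [h, pvG_eq_fold l [] []]
  simp

-- pvG with a nonempty unmasked pending chunk swallows the unmasked prefix.
theorem pvG_pending (ts : List Int) : ∀ (c : List Int), c ≠ [] →
    pvG c ts = (c ++ ts.takeWhile (fun y => !decide (y = -100)))
      :: pvG [] (ts.dropWhile (fun y => !decide (y = -100))) := by
  induction ts with
  | nil => intro c hc; simp [pvG, List.length_pos_iff.2 hc]
  | cons t ts ih =>
    intro c hc
    by_cases ht : t = -100
    · simp [pvG, ht, List.takeWhile, List.dropWhile, List.length_pos_iff.2 hc]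
    · simp only [pvG, if_pos (by exact ht), List.takeWhile, List.dropWhile,
        show (!decide (t = -100)) = true by simp [ht]]
      rw [ih (c ++ [t]) (by simp)]
      simp

theorem pvG_eq_alt (n : ℕ) : ∀ (l : List Int), l.length ≤ n → pvG [] l = extract_unmasked_chunks_alt l := by
  induction n with
  | zero =>
    intro l hl
    have : l = [] := List.eq_nil_of_length_eq_zero (Nat.le_zero.1 hl)
    simp [this, pvG, extract_unmasked_chunks_alt, pvRuns]
  | succ n ih =>
    intro l hl
    match l with
    | [] => simp [pvG, extract_unmasked_chunks_alt, pvRuns]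
    | x :: xs =>
      by_cases hx : x = -100
      · -- masked run: A-style skips one element at a time, B drops the whole run
        have key : ∀ m, ∀ ys : List Int, ys.length ≤ m →
            pvG [] ((-100 : Int) :: ys) = pvG [] (ys.dropWhile (fun y => decide (y = -100))) := by
          intro m
          induction m with
          | zero => intro ys hy; simp [List.eq_nil_of_length_eq_zero (Nat.le_zero.1 hy), pvG]
          | succ m ihm =>
            intro ys hy
            match ys with
            | [] => simp [pvG]
            | y :: ys' =>
              by_cases hy' : y = -100
              · have := ihm ys' (by simpa using Nat.le_of_succ_le_succ hy)
                simp only [pvG, hy'] at this ⊢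
                simp only [List.dropWhile]
                simpa using this
              · simp [pvG, List.dropWhile, hy']
        have hdw : (xs.dropWhile (fun y => decide (y = -100))).length ≤ n := by
          have := List.length_dropWhile_le (fun y => decide (y = -100)) xs
          simp only [List.length_cons] at hl
          omega
        rw [hx, key xs.length xs (le_refl _), ih _ hdw]
        have hkey : (fun y => decide (y = -100) == decide (x = -100))
            = (fun y => decide (y = -100)) := by funext y; simp [hx]
        simp only [extract_unmasked_chunks_alt, pvRuns]
        rw [List.filter_cons]
        simp
      · -- unmasked run
        have hkey : (fun y => decide (y = -100) == decide (x = -100))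
            = (fun y => !decide (y = -100)) := by funext y; simp [hx]
        have hdw : (xs.dropWhile (fun y => !decide (y = -100))).length ≤ n := by
          have := List.length_dropWhile_le (fun y => !decide (y = -100)) xs
          simp only [List.length_cons] at hl
          omega
        simp only [pvG, if_pos (by exact hx), List.nil_append]
        rw [pvG_pending xs [x] (by simp), ih _ hdw]
        simp only [extract_unmasked_chunks_alt, pvRuns, hkey]
        rw [List.filter_cons]
        simp [hx]

-- ===== VERDICT (by name: the statement is the Claim_ definition above) =====
theorem extract_unmasked_chunks_spec : Claim_equal_extract_unmasked_chunks := by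
  intro labels _
  show extract_unmasked_chunks labels = extract_unmasked_chunks_alt labels
  rw [extract_eq_pvG]
  exact pvG_eq_alt labels.length labels (le_refl _)
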